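-- pv_equiv track=rewrite | github.com/Maanster/saveon-demo | royals-concession-intel/dashboard/pages/concession_advisor.py | _get_follow_ups
-- ===== SOURCE A (Python) =====
-- def _get_follow_ups(last_response: str) -> list[str]:
--     """Return 3 contextual follow-up suggestions based on the last response."""
--     lower = last_response.lower()
--
--     if any(w in lower for w in ["prep", "prepare", "staff", "game day"]):
--         return [
--             "What inventory quantities should we order for this game?",
--             "Which stands should we open and how many staff per stand?",
--             "What were sales like for similar past games?",
--         ]
--     elif any(w in lower for w in ["revenue", "per-cap", "benchmark", "gap"]):
--         return [
--             "What specific items could help close the per-cap gap?",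
--             "How does our revenue compare on weekends vs weekdays?",
--             "What would a $2 per-cap improvement mean in total revenue?",
--         ]
--     elif any(w in lower for w in ["combo", "bundle", "deal", "promotion"]):
--         return [
--             "What price points work best for combo deals?",
--             "Which items are most frequently purchased together?",
--             "How have past promotions impacted revenue?",
--         ]
--     elif any(w in lower for w in ["stand", "location", "canteen", "bar"]):
--         return [
--             "What menu changes would you suggest for this stand?",
--             "How does this stand compare to others on busy nights?",
--             "What are the peak hours for this stand?",
--         ]
--     elif any(w in lower for w in ["forecast", "predict", "expect", "demand"]):
--         return [
--             "What factors have the biggest impact on demand?",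
--             "How accurate have past forecasts been?",
--             "What should we prepare differently for playoff games?",
--         ]
--     else:
--         return [
--             "What are the top 3 revenue opportunities we should act on?",
--             "Show me a prep sheet for our next home game.",
--             "Which menu items have the highest profit margin?",
--         ]
-- ===== SOURCE B (Python) =====
-- # B: flat keyword->group-index map; scan all keywords once keeping the
-- # minimum matched group index (branch order = priority), then index into
-- # the suggestion table (last slot = default).
--
-- _KEYWORD_GROUP = {
--     "prep": 0, "prepare": 0, "staff": 0, "game day": 0,
--     "revenue": 1, "per-cap": 1, "benchmark": 1, "gap": 1,
--     "combo": 2, "bundle": 2, "deal": 2, "promotion": 2,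
--     "stand": 3, "location": 3, "canteen": 3, "bar": 3,
--     "forecast": 4, "predict": 4, "expect": 4, "demand": 4,
-- }
--
-- _SUGGESTIONS = [
--     [
--         "What inventory quantities should we order for this game?",
--         "Which stands should we open and how many staff per stand?",
--         "What were sales like for similar past games?",
--     ],
--     [
--         "What specific items could help close the per-cap gap?",
--         "How does our revenue compare on weekends vs weekdays?",
--         "What would a $2 per-cap improvement mean in total revenue?",
--     ],
--     [
--         "What price points work best for combo deals?",
--         "Which items are most frequently purchased together?",
--         "How have past promotions impacted revenue?",
--     ],
--     [
--         "What menu changes would you suggest for this stand?",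
--         "How does this stand compare to others on busy nights?",
--         "What are the peak hours for this stand?",
--     ],
--     [
--         "What factors have the biggest impact on demand?",
--         "How accurate have past forecasts been?",
--         "What should we prepare differently for playoff games?",
--     ],
--     [
--         "What are the top 3 revenue opportunities we should act on?",
--         "Show me a prep sheet for our next home game.",
--         "Which menu items have the highest profit margin?",
--     ],
-- ]
--
--
-- def _get_follow_ups(last_response: str) -> list[str]:
--     lower = last_response.lower()
--     best = len(_SUGGESTIONS) - 1  # default slot
--     for kw, g in _KEYWORD_GROUP.items():
--         if g < best and kw in lower:
--             best = g
--     return _SUGGESTIONS[best]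
-- ===== Notes on version B (the rewrite author's own statement) =====
-- stated objective: alternative
-- what changed: Instead of testing keyword groups sequentially and stopping at the first hit, B flattens all keywords into one keyword-to-priority map, scans it once keeping the minimum matched priority in an accumulator, and indexes a suggestion table (last slot = default); equivalence holds because branch order equals priority order.
import Mathlib
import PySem

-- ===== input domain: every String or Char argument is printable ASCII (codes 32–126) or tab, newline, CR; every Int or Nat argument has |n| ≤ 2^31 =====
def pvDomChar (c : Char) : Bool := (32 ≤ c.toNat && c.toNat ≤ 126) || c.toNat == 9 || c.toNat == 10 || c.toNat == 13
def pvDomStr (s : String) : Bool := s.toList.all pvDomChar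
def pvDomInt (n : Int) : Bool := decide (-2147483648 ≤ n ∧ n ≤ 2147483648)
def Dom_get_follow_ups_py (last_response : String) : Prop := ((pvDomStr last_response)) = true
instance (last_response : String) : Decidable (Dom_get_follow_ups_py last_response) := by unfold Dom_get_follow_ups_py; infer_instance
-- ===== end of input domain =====

-- B replaces A's sequential if/elif group tests by a single min-priority fold over a
-- flat keyword->priority map, then indexes a suggestion table (objective: alternative).


-- ===== PORT A =====
-- Port of A: lowercase once, then the if/elif chain of any-keyword substring tests.
def get_follow_ups_py (last_response : String) : List String :=
  let lower := PySem.Str.lower last_response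
  if ["prep", "prepare", "staff", "game day"].any (fun w => PySem.Str.isIn w lower) then
    ["What inventory quantities should we order for this game?",
     "Which stands should we open and how many staff per stand?",
     "What were sales like for similar past games?"]
  else if ["revenue", "per-cap", "benchmark", "gap"].any (fun w => PySem.Str.isIn w lower) then
    ["What specific items could help close the per-cap gap?",
     "How does our revenue compare on weekends vs weekdays?",
     "What would a $2 per-cap improvement mean in total revenue?"]
  else if ["combo", "bundle", "deal", "promotion"].any (fun w => PySem.Str.isIn w lower) then
    ["What price points work best for combo deals?",
     "Which items are most frequently purchased together?",
     "How have past promotions impacted revenue?"]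
  else if ["stand", "location", "canteen", "bar"].any (fun w => PySem.Str.isIn w lower) then
    ["What menu changes would you suggest for this stand?",
     "How does this stand compare to others on busy nights?",
     "What are the peak hours for this stand?"]
  else if ["forecast", "predict", "expect", "demand"].any (fun w => PySem.Str.isIn w lower) then
    ["What factors have the biggest impact on demand?",
     "How accurate have past forecasts been?",
     "What should we prepare differently for playoff games?"]
  else
    ["What are the top 3 revenue opportunities we should act on?",
     "Show me a prep sheet for our next home game.",
     "Which menu items have the highest profit margin?"]

-- ===== PORT B =====
-- Port of B: flat keyword->priority association list (dict insertion order) …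
def keywordGroup : List (String × Nat) :=
  [("prep", 0), ("prepare", 0), ("staff", 0), ("game day", 0),
   ("revenue", 1), ("per-cap", 1), ("benchmark", 1), ("gap", 1),
   ("combo", 2), ("bundle", 2), ("deal", 2), ("promotion", 2),
   ("stand", 3), ("location", 3), ("canteen", 3), ("bar", 3),
   ("forecast", 4), ("predict", 4), ("expect", 4), ("demand", 4)]

-- … and the suggestion table, last slot = default.
def suggestions : List (List String) :=
  [["What inventory quantities should we order for this game?",
    "Which stands should we open and how many staff per stand?",
    "What were sales like for similar past games?"],
   ["What specific items could help close the per-cap gap?",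
    "How does our revenue compare on weekends vs weekdays?",
    "What would a $2 per-cap improvement mean in total revenue?"],
   ["What price points work best for combo deals?",
    "Which items are most frequently purchased together?",
    "How have past promotions impacted revenue?"],
   ["What menu changes would you suggest for this stand?",
    "How does this stand compare to others on busy nights?",
    "What are the peak hours for this stand?"],
   ["What factors have the biggest impact on demand?",
    "How accurate have past forecasts been?",
    "What should we prepare differently for playoff games?"],
   ["What are the top 3 revenue opportunities we should act on?",
    "Show me a prep sheet for our next home game.",
    "Which menu items have the highest profit margin?"]]

-- Port of B: fold keeping the minimum matched priority; `_SUGGESTIONS[best]` is ported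
-- with getD (best is always < suggestions.length, so Python's indexing never raises).
def get_follow_ups_py_alt (last_response : String) : List String :=
  let lower := PySem.Str.lower last_response
  let best := keywordGroup.foldl
    (fun best p => if p.2 < best && PySem.Str.isIn p.1 lower then p.2 else best)
    (suggestions.length - 1)
  suggestions.getD best []

-- ===== PRECONDITION & SPEC =====
def Spec_get_follow_ups_py (last_response : String) (out : List String) : Prop := out = get_follow_ups_py_alt last_response
instance (last_response : String) (out : List String) : Decidable (Spec_get_follow_ups_py last_response out) := by unfold Spec_get_follow_ups_py; infer_instance

-- ===== CLAIM (what is proved, stated in full; the proofs are below) =====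
def Claim_equal_get_follow_ups_py : Prop := ∀ (last_response : String), Dom_get_follow_ups_py last_response → Spec_get_follow_ups_py last_response (get_follow_ups_py last_response)

-- ===== LEMMAS AND PROOFS =====

-- Folding B's min-priority step over one group (all keywords with the same priority g)
-- lowers the accumulator to g iff g < best and some keyword of the group hits.
theorem foldl_group (lower : String) (g : Nat) (kws : List String) :
    ∀ best : Nat,
      List.foldl (fun best p => if p.2 < best && PySem.Str.isIn p.1 lower then p.2 else best)
        best (kws.map (fun w => (w, g))) =
      if g < best && kws.any (fun w => PySem.Str.isIn w lower) then g else best := by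
  induction kws with
  | nil => intro best; simp
  | cons w kws ih =>
    intro best
    simp only [List.map_cons, List.foldl_cons, List.any_cons, ih]
    by_cases hw : PySem.Chars.isIn w.toList lower.toList = true <;>
      by_cases ha : (∃ x ∈ kws, PySem.Chars.isIn x.toList lower.toList = true) <;>
        by_cases hg : g < best <;>
          simp [hw, ha, hg]

theorem keywordGroup_split :
    keywordGroup =
      (["prep", "prepare", "staff", "game day"].map (fun w => (w, 0))) ++
      (["revenue", "per-cap", "benchmark", "gap"].map (fun w => (w, 1))) ++
      (["combo", "bundle", "deal", "promotion"].map (fun w => (w, 2))) ++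
      (["stand", "location", "canteen", "bar"].map (fun w => (w, 3))) ++
      (["forecast", "predict", "expect", "demand"].map (fun w => (w, 4))) := rfl

-- ===== VERDICT (by name: the statement is the Claim_ definition above) =====
theorem get_follow_ups_py_spec : Claim_equal_get_follow_ups_py := by
  intro s _
  unfold Spec_get_follow_ups_py get_follow_ups_py get_follow_ups_py_alt
  rw [keywordGroup_split]
  simp only [List.foldl_append, foldl_group]
  cases hA : (["prep", "prepare", "staff", "game day"] : List String).any
      (fun w => PySem.Str.isIn w (PySem.Str.lower s)) <;>
  cases hB : (["revenue", "per-cap", "benchmark", "gap"] : List String).any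
      (fun w => PySem.Str.isIn w (PySem.Str.lower s)) <;>
  cases hC : (["combo", "bundle", "deal", "promotion"] : List String).any
      (fun w => PySem.Str.isIn w (PySem.Str.lower s)) <;>
  cases hD : (["stand", "location", "canteen", "bar"] : List String).any
      (fun w => PySem.Str.isIn w (PySem.Str.lower s)) <;>
  cases hE : (["forecast", "predict", "expect", "demand"] : List String).any
      (fun w => PySem.Str.isIn w (PySem.Str.lower s)) <;>
  simp [suggestions]
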